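-- pv_equiv track=rewrite | github.com/arshinmar/UTEK2020 | part2.py | batch_sort_actions
-- ===== SOURCE A (Python) =====
-- REPLACEMENT_ID = 3
--
-- def batch_sort_actions(actions):
--     """Sorts actions obtained from dp matrix such that the correct indices for
--     each action are respected. This ensures that the final set of actions
--     actually changes the original string into the desired string.
--
--     Args:
--         actions (list): 2D list of actions [[Action1],[Action2],...] where each
--         action is a list of the format [ActionID,Index,Character]
--
--     Returns:
--         A 2D list of actions [[Action1],[Action2],...].
--     """
--     processed_actions = []
--     insertion_deletion_dict = {}
--
--     # Since replacements do not affect indices, all of the replacments should be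
--     # performed first. Therefore they should also be stored first since they
--     # require no further processing.
--     for action in actions:
--         if action[0] == REPLACEMENT_ID:
--             processed_actions += [action]
--         else:
--             # Since insertions and deletions affect indices, they are stored
--             # into a dictionary where the action's index is the key and the
--             # value is a list containing the action. The dictionary allows
--             # actions affecting the same index to be stored together
--             if action[1] not in insertion_deletion_dict:
--                 insertion_deletion_dict[action[1]] = [action]
--             else:
--                 insertion_deletion_dict[action[1]].append(action)
--
--     # Since insertions and deletions at higher indices do not affect the
--     # positions of lower indices, they should be performed first and thus be put
--     # in the processed_actions before actions at lower indices.
--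
--     # Also note that if multiple actions are meant to be performed at the same
--     # index, the first action will affect the indices of the future actions.
--     # Thus, the later insertions/deletions should once again be performed first.
--
--     for index in reversed(sorted(insertion_deletion_dict.keys())):
--         # Store the actions at each index in reversed order
--         processed_actions += reversed(insertion_deletion_dict[index])
--
--     return processed_actions
-- ===== SOURCE B (Python) =====
-- REPLACEMENT_ID = 3
--
-- def batch_sort_actions(actions):
--     replacements = [a for a in actions if a[0] == REPLACEMENT_ID]
--     others = [(i, a) for i, a in enumerate(actions) if a[0] != REPLACEMENT_ID]
--     others.sort(key=lambda p: (-p[1][1], -p[0]))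
--     return replacements + [a for _, a in others]
-- ===== Notes on version B (the rewrite author's own statement) =====
-- stated objective: alternative
-- what changed: Replaced A's dict-grouping of insertions/deletions plus reversed per-index emission with a single stable sort of enumerate(actions) under the composite key (-index, -position), keeping replacements first by a plain filter.
import Mathlib
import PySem

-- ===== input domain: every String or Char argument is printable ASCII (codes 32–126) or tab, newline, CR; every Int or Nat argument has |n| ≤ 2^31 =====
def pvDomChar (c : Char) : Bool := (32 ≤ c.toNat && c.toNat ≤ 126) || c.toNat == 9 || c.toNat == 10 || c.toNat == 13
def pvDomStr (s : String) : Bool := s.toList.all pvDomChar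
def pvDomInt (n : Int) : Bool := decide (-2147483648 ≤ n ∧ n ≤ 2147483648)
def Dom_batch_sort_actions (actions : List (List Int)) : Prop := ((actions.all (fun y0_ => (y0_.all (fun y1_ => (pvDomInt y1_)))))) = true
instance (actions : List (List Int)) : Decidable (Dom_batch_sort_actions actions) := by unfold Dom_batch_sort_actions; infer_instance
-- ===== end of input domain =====

-- B replaces A's dict-grouping + per-index reversed emission by one stable sort of
-- enumerate(actions) under the composite key (-index, -position); same return value, different decomposition.

-- ===== PORT A =====
def batch_sort_actions (actions : List (List Int)) : List (List Int) :=
  -- first loop: processed_actions / insertion_deletion_dict built in one pass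
  let st := actions.foldl
    (fun (st : List (List Int) × PySem.Dict Int (List (List Int))) action =>
      if PySem.List.pyGetD action 0 0 == 3 then
        (st.1 ++ [action], st.2)
      else
        if !(st.2.contains (PySem.List.pyGetD action 1 0)) then
          (st.1, st.2.insert (PySem.List.pyGetD action 1 0) [action])
        else
          (st.1, st.2.modify (PySem.List.pyGetD action 1 0) [] (fun g => g ++ [action])))
    ([], PySem.Dict.empty)
  -- second loop: for index in reversed(sorted(keys)): processed += reversed(dict[index])
  ((PySem.List.sorted st.2.keys (fun k => k)).reverse).foldl
    (fun acc k => acc ++ (st.2.getD k []).reverse) st.1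

-- ===== PORT B =====
def batch_sort_actions_alt (actions : List (List Int)) : List (List Int) :=
  let replacements := actions.filter (fun a => PySem.List.pyGetD a 0 0 == 3)
  let others := (PySem.List.enumerate actions).filter (fun p => !(PySem.List.pyGetD p.2 0 0 == 3))
  -- others.sort(key=lambda p: (-p[1][1], -p[0])) — Python's lexicographic tuple order is Lex (Int × Int)
  let sortedOthers := PySem.List.sorted others
    (fun p => (toLex (-(PySem.List.pyGetD p.2 1 0), -p.1) : Lex (Int × Int)))
  replacements ++ sortedOthers.map (fun p => p.2)

-- ===== PRECONDITION & SPEC =====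
-- Pre_ excludes exactly the inputs where Python A raises IndexError: an empty action
-- (action[0] fails) or a one-element non-replacement action (action[1] fails).
def Pre_batch_sort_actions (actions : List (List Int)) : Prop :=
  ∀ a ∈ actions, a ≠ [] ∧ (PySem.List.pyGetD a 0 0 = 3 ∨ 2 ≤ a.length)
instance (actions : List (List Int)) : Decidable (Pre_batch_sort_actions actions) := by
  unfold Pre_batch_sort_actions; infer_instance
def pvWitness_batch_sort_actions : List (List Int) := [[3, 0, 99], [1, 2, 97], [2, 2, 98], [1, 0, 97]]

def Spec_batch_sort_actions (actions : List (List Int)) (out : List (List Int)) : Prop := out = batch_sort_actions_alt actions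
instance (actions : List (List Int)) (out : List (List Int)) : Decidable (Spec_batch_sort_actions actions out) := by unfold Spec_batch_sort_actions; infer_instance

-- ===== CLAIM (what is proved, stated in full; the proofs are below) =====
def Claim_equal_batch_sort_actions : Prop := ∀ (actions : List (List Int)), Dom_batch_sort_actions actions → Pre_batch_sort_actions actions → Spec_batch_sort_actions actions (batch_sort_actions actions)

-- ===== LEMMAS AND PROOFS =====

-- a list of distinct keys covering all of E: emitting the (reversed) f-fibers key by key permutes E
lemma pv_flatMap_filter_rev_perm {α : Type} (f : α → Int) :
    ∀ (ks : List Int) (E : List α), ks.Nodup → (∀ p ∈ E, f p ∈ ks) →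
    (ks.flatMap (fun k => (E.filter (fun p => f p == k)).reverse)).Perm E := by
  intro ks
  induction ks with
  | nil =>
      intro E _ hcov
      cases E with
      | nil => simp
      | cons p t => exact absurd (hcov p (by simp)) (by simp)
  | cons k ks ih =>
      intro E hnd hcov
      rw [List.flatMap_cons]
      have hknotmem : k ∉ ks := (List.nodup_cons.mp hnd).1
      have hfib : ∀ k' ∈ ks, E.filter (fun p => f p == k')
          = (E.filter (fun p => !(f p == k))).filter (fun p => f p == k') := by
        intro k' hk'
        rw [List.filter_filter]
        apply List.filter_congr
        intro p _
        by_cases h : f p = k'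
        · have hne : f p ≠ k := by
            rintro rfl
            exact hknotmem (h ▸ hk')
          have hkk : ¬k' = k := fun hkk => hne (h.trans hkk)
          rw [h]
          simp [hkk]
        · simp [h]
      have hflat : ks.flatMap (fun k' => (E.filter (fun p => f p == k')).reverse)
          = ks.flatMap (fun k' => ((E.filter (fun p => !(f p == k))).filter (fun p => f p == k')).reverse) := by
        rw [List.flatMap_def, List.flatMap_def]
        congr 1
        exact List.map_congr_left (fun k' hk' => by rw [hfib k' hk'])
      rw [hflat]
      have ih' := ih (E.filter (fun p => !(f p == k))) (List.nodup_cons.mp hnd).2 (by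
        intro p hp
        have hpE := List.mem_of_mem_filter hp
        have := hcov p hpE
        have hne : ¬ (f p == k) = true := by
          have := List.of_mem_filter hp
          simpa using this
        simp only [List.mem_cons] at this
        rcases this with h | h
        · exact absurd (by simpa using h) hne
        · exact h)
      exact ((List.reverse_perm _).append ih').trans (List.filter_append_perm _ E)

-- strictly decreasing keys + strictly g-increasing E: the emitted list is strictly increasing under toLex (-f, -g)
lemma pv_flatMap_pairwise {α : Type} (f g : α → Int) (ks : List Int) (E : List α)
    (hks : ks.Pairwise (fun a b => b < a))
    (hE : E.Pairwise (fun p q => g p < g q)) :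
    (ks.flatMap (fun k => (E.filter (fun p => f p == k)).reverse)).Pairwise
      (fun p q => (toLex (-(f p), -(g p)) : Lex (Int × Int)) < toLex (-(f q), -(g q))) := by
  rw [List.flatMap_def, List.pairwise_flatten]
  constructor
  · intro l hl
    rw [List.mem_map] at hl
    obtain ⟨k, _, rfl⟩ := hl
    rw [List.pairwise_reverse]
    have hfil : (E.filter (fun p => f p == k)).Pairwise (fun p q => g p < g q) := hE.filter _
    apply hfil.imp_of_mem
    intro a b ha hb hab
    have hfa : f a = k := by simpa using List.of_mem_filter ha
    have hfb : f b = k := by simpa using List.of_mem_filter hb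
    rw [Prod.Lex.toLex_lt_toLex]
    right
    exact ⟨by rw [hfa, hfb], by omega⟩
  · rw [List.pairwise_map]
    apply hks.imp_of_mem
    intro k1 k2 _ _ hlt x hx y hy
    have hfx : f x = k1 := by simpa using List.of_mem_filter (List.mem_reverse.mp hx)
    have hfy : f y = k2 := by simpa using List.of_mem_filter (List.mem_reverse.mp hy)
    rw [Prod.Lex.toLex_lt_toLex]
    left
    rw [hfx, hfy]
    omega

-- the grouping dict built by A's loop: lookups are the f-fibers of the remaining actions
lemma pv_dict_getD (N : List (List Int)) (c : Int) :
    (List.foldl (fun (d : PySem.Dict Int (List (List Int))) (a : List Int) =>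
        d.modify (PySem.List.pyGetD a 1 0) [] (fun g => g ++ [a])) PySem.Dict.empty N).getD c []
    = N.filter (fun a => PySem.List.pyGetD a 1 0 == c) := by
  rw [show List.foldl (fun (d : PySem.Dict Int (List (List Int))) (a : List Int) =>
        d.modify (PySem.List.pyGetD a 1 0) [] (fun g => g ++ [a])) PySem.Dict.empty N
      = List.foldl (fun d p => d.modify p.1 [] (fun g => g ++ [p.2])) PySem.Dict.empty
          (N.map (fun a => (PySem.List.pyGetD a 1 0, a))) from
        (List.foldl_map (f := fun a => (PySem.List.pyGetD a 1 0, a))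
          (g := fun (d : PySem.Dict Int (List (List Int))) (p : Int × List Int) =>
            d.modify p.1 [] (fun g => g ++ [p.2]))).symm]
  rw [PySem.Dict.getD_foldl_modify_append]
  simp [List.filter_map, Function.comp_def]

-- and its key list is the ordered set of indices
lemma pv_dict_keys (N : List (List Int)) :
    (List.foldl (fun (d : PySem.Dict Int (List (List Int))) (a : List Int) =>
        d.modify (PySem.List.pyGetD a 1 0) [] (fun g => g ++ [a])) PySem.Dict.empty N).keys
    = PySem.Set.ofList (N.map (fun a => PySem.List.pyGetD a 1 0)) := by
  rw [PySem.Dict.keys_foldl_modify_key N (fun a => PySem.List.pyGetD a 1 0) []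
        (fun _ a => fun g => g ++ [a]) PySem.Dict.empty]
  rfl

-- map-snd commutes with a filter that only looks at the second component
lemma pv_map_snd_filter {α β : Type} (p : β → Bool) (l : List (α × β)) :
    ((l.filter (fun q => p q.2)).map (fun q => q.2)) = (l.map (fun q => q.2)).filter p := by
  induction l with
  | nil => simp
  | cons x t ih => by_cases h : p x.2 <;> simp [h, ih]

-- ===== VERDICT (by name: the statement is the Claim_ definition above) =====
theorem batch_sort_actions_spec : Claim_equal_batch_sort_actions := by
  intro actions _ _
  unfold Spec_batch_sort_actions batch_sort_actions batch_sort_actions_alt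
  dsimp only
  -- A's single pass with two accumulators is two independent folds
  rw [show (fun (st : List (List Int) × PySem.Dict Int (List (List Int))) action =>
        if PySem.List.pyGetD action 0 0 == 3 then (st.1 ++ [action], st.2)
        else
          if !(st.2.contains (PySem.List.pyGetD action 1 0)) then
            (st.1, st.2.insert (PySem.List.pyGetD action 1 0) [action])
          else
            (st.1, st.2.modify (PySem.List.pyGetD action 1 0) [] (fun g => g ++ [action])))
      = (fun (st : List (List Int) × PySem.Dict Int (List (List Int))) action =>
        ((fun (acc : List (List Int)) (action : List Int) =>
            if PySem.List.pyGetD action 0 0 == 3 then acc ++ [action] else acc) st.1 action,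
         (fun (d : PySem.Dict Int (List (List Int))) (action : List Int) =>
            if PySem.List.pyGetD action 0 0 == 3 then d
            else
              if !(d.contains (PySem.List.pyGetD action 1 0)) then
                d.insert (PySem.List.pyGetD action 1 0) [action]
              else
                d.modify (PySem.List.pyGetD action 1 0) [] (fun g => g ++ [action])) st.2 action))
      from by funext st a; dsimp only; split_ifs <;> rfl]
  rw [PySem.List.foldl_prod_mk
        (f := fun (acc : List (List Int)) (action : List Int) =>
            if PySem.List.pyGetD action 0 0 == 3 then acc ++ [action] else acc)
        (g := fun (d : PySem.Dict Int (List (List Int))) (action : List Int) =>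
            if PySem.List.pyGetD action 0 0 == 3 then d
            else
              if !(d.contains (PySem.List.pyGetD action 1 0)) then
                d.insert (PySem.List.pyGetD action 1 0) [action]
              else
                d.modify (PySem.List.pyGetD action 1 0) [] (fun g => g ++ [action]))]
  rw [PySem.List.foldl_append_if_eq_filter]
  -- the dict loop: skip replacements (filter), then every remaining step is a keyed modify
  rw [show (fun (d : PySem.Dict Int (List (List Int))) (action : List Int) =>
        if PySem.List.pyGetD action 0 0 == 3 then d
        else
          if !(d.contains (PySem.List.pyGetD action 1 0)) then
            d.insert (PySem.List.pyGetD action 1 0) [action]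
          else
            d.modify (PySem.List.pyGetD action 1 0) [] (fun g => g ++ [action]))
      = (fun (d : PySem.Dict Int (List (List Int))) (action : List Int) =>
        if !(PySem.List.pyGetD action 0 0 == 3) then
          (if !(d.contains (PySem.List.pyGetD action 1 0)) then
            d.insert (PySem.List.pyGetD action 1 0) [action]
          else
            d.modify (PySem.List.pyGetD action 1 0) [] (fun g => g ++ [action]))
        else d)
      from by funext d a; by_cases h : (PySem.List.pyGetD a 0 0 == 3) = true <;> simp [h]]
  rw [PySem.List.foldl_if_eq_foldl_filter]
  rw [PySem.List.foldl_congr_mem _ _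
        (fun (d : PySem.Dict Int (List (List Int))) (a : List Int) =>
          d.modify (PySem.List.pyGetD a 1 0) [] (fun g => g ++ [a])) _
        (by
          intro d a _
          by_cases hc : d.contains (PySem.List.pyGetD a 1 0) = true
          · simp [hc]
          · simp only [Bool.not_eq_true] at hc
            simp [hc, PySem.Dict.modify, PySem.Dict.getD_of_not_contains _ _ hc])]
  simp only [pv_dict_getD, pv_dict_keys]
  rw [PySem.List.foldl_append_eq_flatMap]
  simp only [List.nil_append]
  have hEN : (List.filter (fun p => !(PySem.List.pyGetD p.2 0 0 == 3)) (PySem.List.enumerate actions)).map (fun p => p.2)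
      = List.filter (fun a => !(PySem.List.pyGetD a 0 0 == 3)) actions := by
    rw [pv_map_snd_filter (fun a => !(PySem.List.pyGetD a 0 0 == 3)) (PySem.List.enumerate actions)]
    rw [PySem.List.map_snd_enumerate]
  have hKpair : ((PySem.List.sorted (PySem.Set.ofList ((List.filter (fun a => !(PySem.List.pyGetD a 0 0 == 3)) actions).map (fun a => PySem.List.pyGetD a 1 0))) (fun k => k)).reverse).Pairwise (fun a b => b < a) :=
    List.pairwise_reverse.mpr (PySem.List.sorted_ofList_pairwise_lt _)
  have hKnodup : ((PySem.List.sorted (PySem.Set.ofList ((List.filter (fun a => !(PySem.List.pyGetD a 0 0 == 3)) actions).map (fun a => PySem.List.pyGetD a 1 0))) (fun k => k)).reverse).Nodup :=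
    hKpair.imp (fun h => ne_of_gt h)
  have hcov : ∀ p ∈ (List.filter (fun p => !(PySem.List.pyGetD p.2 0 0 == 3)) (PySem.List.enumerate actions)),
      PySem.List.pyGetD p.2 1 0 ∈ (PySem.List.sorted (PySem.Set.ofList ((List.filter (fun a => !(PySem.List.pyGetD a 0 0 == 3)) actions).map (fun a => PySem.List.pyGetD a 1 0))) (fun k => k)).reverse := by
    intro p hp
    have h2 : p.2 ∈ List.filter (fun a => !(PySem.List.pyGetD a 0 0 == 3)) actions := by
      rw [← hEN]
      exact List.mem_map_of_mem hp
    simp only [List.mem_reverse, PySem.List.mem_sorted, PySem.Set.mem_ofList]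
    exact List.mem_map_of_mem h2
  have hEpair : (List.filter (fun p => !(PySem.List.pyGetD p.2 0 0 == 3)) (PySem.List.enumerate actions)).Pairwise (fun p q => p.1 < q.1) :=
    (PySem.List.pairwise_lt_enumerate actions 0).filter _
  have hperm := pv_flatMap_filter_rev_perm (fun p => PySem.List.pyGetD p.2 1 0)
    ((PySem.List.sorted (PySem.Set.ofList ((List.filter (fun a => !(PySem.List.pyGetD a 0 0 == 3)) actions).map (fun a => PySem.List.pyGetD a 1 0))) (fun k => k)).reverse)
    (List.filter (fun p => !(PySem.List.pyGetD p.2 0 0 == 3)) (PySem.List.enumerate actions)) hKnodup hcov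
  have hpw := pv_flatMap_pairwise (fun p => PySem.List.pyGetD p.2 1 0) (fun p => p.1)
    ((PySem.List.sorted (PySem.Set.ofList ((List.filter (fun a => !(PySem.List.pyGetD a 0 0 == 3)) actions).map (fun a => PySem.List.pyGetD a 1 0))) (fun k => k)).reverse)
    (List.filter (fun p => !(PySem.List.pyGetD p.2 0 0 == 3)) (PySem.List.enumerate actions)) hKpair hEpair
  rw [PySem.List.sorted_eq_of_perm_of_pairwise_lt _ _
        (fun p => (toLex (-(PySem.List.pyGetD p.2 1 0), -p.1) : Lex (Int × Int))) hperm hpw]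
  congr 1
  rw [List.map_flatMap]
  rw [List.flatMap_def, List.flatMap_def]
  congr 1
  apply List.map_congr_left
  intro k _
  rw [List.map_reverse,
      pv_map_snd_filter (fun a => PySem.List.pyGetD a 1 0 == k)
        (List.filter (fun p => !(PySem.List.pyGetD p.2 0 0 == 3)) (PySem.List.enumerate actions)),
      hEN]
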